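-- pv_equiv track=rewrite | github.com/waliwassim/ocr-pipeline-hekzam | STN_LeNet5/detection_coins.py | sort_points_logically
-- ===== SOURCE A (Python) =====
-- def sort_points_logically(points, y_threshold=20):
--     """Regroupe les points par lignes (Y) puis les trie par colonnes (X)."""
--     if not points:
--         return []
--     points.sort(key=lambda p: p[1])
--     sorted_list = []
--     current_line = [points[0]]
--     for i in range(1, len(points)):
--         if abs(points[i][1] - current_line[-1][1]) <= y_threshold:
--             current_line.append(points[i])
--         else:
--             current_line.sort(key=lambda p: p[0])
--             sorted_list.extend(current_line)
--             current_line = [points[i]]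
--     current_line.sort(key=lambda p: p[0])
--     sorted_list.extend(current_line)
--     return sorted_list
-- ===== SOURCE B (Python) =====
-- def sort_points_logically(points, y_threshold=20):
--     """Regroupe les points par lignes (Y) puis les trie par colonnes (X)."""
--     if not points:
--         return []
--     points.sort(key=lambda p: p[1])
--     groups = [0]
--     for i in range(1, len(points)):
--         if abs(points[i][1] - points[i - 1][1]) > y_threshold:
--             groups.append(groups[-1] + 1)
--         else:
--             groups.append(groups[-1])
--     order = sorted(range(len(points)), key=lambda i: (groups[i], points[i][0]))
--     return [points[i] for i in order]
-- ===== Notes on version B (the rewrite author's own statement) =====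
-- stated objective: alternative
-- what changed: Instead of accumulating the current line, sorting each completed line by X and extending the output, B annotates each Y-sorted point with a line index in one pass and returns the points reordered by a single stable sort on the composite key (line index, x).
import Mathlib
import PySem

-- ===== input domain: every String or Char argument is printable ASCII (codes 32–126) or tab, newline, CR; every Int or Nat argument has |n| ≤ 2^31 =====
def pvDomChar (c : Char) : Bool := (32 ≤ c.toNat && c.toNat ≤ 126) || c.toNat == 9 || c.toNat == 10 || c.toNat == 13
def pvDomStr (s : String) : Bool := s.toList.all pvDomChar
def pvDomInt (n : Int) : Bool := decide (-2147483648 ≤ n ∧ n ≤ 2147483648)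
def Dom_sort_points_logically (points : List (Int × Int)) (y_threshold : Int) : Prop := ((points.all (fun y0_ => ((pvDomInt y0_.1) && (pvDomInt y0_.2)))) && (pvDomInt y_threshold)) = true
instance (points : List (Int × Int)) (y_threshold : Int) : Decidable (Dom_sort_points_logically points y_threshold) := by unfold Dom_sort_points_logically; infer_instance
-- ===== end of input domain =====

-- B annotates the Y-sorted points with a line index in one pass and does a single stable sort on the
-- composite key (line index, x), instead of sorting each completed line separately; equal cost, no
-- speed claim.  Side effect (both Pythons): `points` is left sorted by Y in place; the theorems
-- below are about the return value.

-- ===== PORT A =====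
-- `current_line[-1]` is ported as `st.2.getLast?.getD (0,0)`: current_line is never empty, so the default is unreachable.
def sort_points_logically (points : List (Int × Int)) (y_threshold : Int) : List (Int × Int) :=
  if points = [] then []
  else
    let pts := PySem.List.sorted points (fun p => p.2) false
    let st := (PySem.List.pyRange 1 (pts.length : Int) 1).foldl
      (fun (st : List (Int × Int) × List (Int × Int)) i =>
        if |(PySem.List.pyGetD pts i (0, 0)).2 - (st.2.getLast?.getD (0, 0)).2| ≤ y_threshold then
          (st.1, st.2 ++ [PySem.List.pyGetD pts i (0, 0)])
        else
          (st.1 ++ PySem.List.sorted st.2 (fun q => q.1) false, [PySem.List.pyGetD pts i (0, 0)]))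
      ([], [PySem.List.pyGetD pts 0 (0, 0)])
    st.1 ++ PySem.List.sorted st.2 (fun q => q.1) false

-- ===== PORT B =====
-- `groups[-1]` is ported as `gs.getLast?.getD 0`: groups starts as [0] and only grows, so the default is unreachable.
def sort_points_logically_alt (points : List (Int × Int)) (y_threshold : Int) : List (Int × Int) :=
  if points = [] then []
  else
    let pts := PySem.List.sorted points (fun p => p.2) false
    let groups := (PySem.List.pyRange 1 (pts.length : Int) 1).foldl
      (fun (gs : List Int) i =>
        if y_threshold < |(PySem.List.pyGetD pts i (0, 0)).2 - (PySem.List.pyGetD pts (i - 1) (0, 0)).2| then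
          gs ++ [gs.getLast?.getD 0 + 1]
        else
          gs ++ [gs.getLast?.getD 0])
      [0]
    let order := PySem.List.sorted2 (PySem.List.pyRange 0 (pts.length : Int) 1)
      (fun i => PySem.List.pyGetD groups i 0)
      (fun i => (PySem.List.pyGetD pts i (0, 0)).1) false
    order.map (fun i => PySem.List.pyGetD pts i (0, 0))

-- ===== PRECONDITION & SPEC =====
def Spec_sort_points_logically (points : List (Int × Int)) (y_threshold : Int) (out : List (Int × Int)) : Prop := out = sort_points_logically_alt points y_threshold
instance (points : List (Int × Int)) (y_threshold : Int) (out : List (Int × Int)) : Decidable (Spec_sort_points_logically points y_threshold out) := by unfold Spec_sort_points_logically; infer_instance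

-- ===== CLAIM (what is proved, stated in full; the proofs are below) =====
def Claim_equal_sort_points_logically : Prop := ∀ (points : List (Int × Int)) (y_threshold : Int), Dom_sort_points_logically points y_threshold → Spec_sort_points_logically points y_threshold (sort_points_logically points y_threshold)

-- ===== LEMMAS AND PROOFS =====

-- x / y coordinate of the i-th Y-sorted point, and the line index G of position i
def pvX (pts : List (Int × Int)) (i : Nat) : Int := (pts.getD i (0, 0)).1
def pvY (pts : List (Int × Int)) (i : Nat) : Int := (pts.getD i (0, 0)).2
def pvG (pts : List (Int × Int)) (t : Int) : Nat → Int
  | 0 => 0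
  | i + 1 => pvG pts t i + (if t < |pvY pts (i + 1) - pvY pts i| then 1 else 0)

-- the total order (line, x, position) both outputs are sorted by
def pvR (pts : List (Int × Int)) (t : Int) (i j : Nat) : Prop :=
  pvG pts t i < pvG pts t j ∨
    (pvG pts t i = pvG pts t j ∧
      (pvX pts i < pvX pts j ∨ (pvX pts i = pvX pts j ∧ i ≤ j)))

lemma insertBy_nil {α : Type} (bf : α → α → Bool) (x : α) :
    PySem.List.insertBy bf x [] = [x] := rfl

lemma insertBy_cons {α : Type} (bf : α → α → Bool) (x y : α) (ys : List α) :
    PySem.List.insertBy bf x (y :: ys) =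
      if bf x y then x :: y :: ys else y :: PySem.List.insertBy bf x ys := rfl

lemma insertBy_map {α β : Type} (f : α → β) (bf : β → β → Bool) (x : α) (S : List α) :
    PySem.List.insertBy bf (f x) (S.map f)
      = (PySem.List.insertBy (fun a b => bf (f a) (f b)) x S).map f := by
  induction S with
  | nil => rfl
  | cons y ys ih =>
      simp only [List.map_cons, insertBy_cons]
      by_cases h : bf (f x) (f y) <;> simp [h, ih]

lemma foldl_insertBy_map {α β : Type} (f : α → β) (bf : β → β → Bool) :
    ∀ (L : List α) (acc : List α),
      (L.map f).foldl (fun a z => PySem.List.insertBy bf z a) (acc.map f)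
        = (L.foldl (fun a i => PySem.List.insertBy (fun i j => bf (f i) (f j)) i a) acc).map f := by
  intro L
  induction L with
  | nil => intro acc; rfl
  | cons x xs ih =>
      intro acc
      simp only [List.map_cons, List.foldl_cons]
      rw [insertBy_map f bf x acc]
      exact ih _

lemma insertBy_congr {α : Type} (bf bf' : α → α → Bool) (x : α) (S : List α)
    (h : ∀ y ∈ S, bf x y = bf' x y) :
    PySem.List.insertBy bf x S = PySem.List.insertBy bf' x S := by
  induction S with
  | nil => rfl
  | cons y ys ih =>
      simp only [insertBy_cons]
      rw [h y (by simp)]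
      by_cases hy : bf' x y
      · simp [hy]
      · simp [hy, ih (fun z hz => h z (by simp [hz]))]

lemma foldl_insertBy_congr {α : Type} (p : α → Prop) (bf bf' : α → α → Bool)
    (h : ∀ a b, p a → p b → bf a b = bf' a b) :
    ∀ (L : List α) (acc : List α), (∀ a ∈ L, p a) → (∀ a ∈ acc, p a) →
      L.foldl (fun a z => PySem.List.insertBy bf z a) acc
        = L.foldl (fun a z => PySem.List.insertBy bf' z a) acc := by
  intro L
  induction L with
  | nil => intro acc _ _; rfl
  | cons x xs ih =>
      intro acc hL hacc
      simp only [List.foldl_cons]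
      have hx : p x := hL x (by simp)
      rw [insertBy_congr bf bf' x acc (fun y hy => h x y hx (hacc y hy))]
      exact ih _ (fun a ha => hL a (by simp [ha]))
        (fun a ha => by
          rcases (PySem.List.mem_insertBy _ _ _ _).1 ha with h1 | h1
          · exact h1 ▸ hx
          · exact hacc a h1)

-- the order a stable insertion sort establishes: strictly before, or tied and in original position order
def pvRb (before : Nat → Nat → Bool) (i j : Nat) : Prop :=
  before i j = true ∨ (before i j = false ∧ before j i = false ∧ i ≤ j)

lemma insertBy_stable (before : Nat → Nat → Bool)
    (hasym : ∀ a b, before a b = true → before b a = false)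
    (hn : ∀ a b c, before a b = false → before b c = false → before a c = false)
    (x : Nat) :
    ∀ (S : List Nat), S.Pairwise (pvRb before) → (∀ y ∈ S, y < x) →
      (PySem.List.insertBy before x S).Perm (x :: S) ∧
        (PySem.List.insertBy before x S).Pairwise (pvRb before) := by
  intro S
  induction S with
  | nil => intro _ _; exact ⟨by simp [insertBy_nil], by simp [insertBy_nil]⟩
  | cons y ys ih =>
      intro hpw hlt
      rw [List.pairwise_cons] at hpw
      obtain ⟨hy, hys⟩ := hpw
      by_cases hb : before x y
      · refine ⟨by simp [insertBy_cons, hb], ?_⟩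
        simp only [insertBy_cons, hb, if_true]
        refine List.Pairwise.cons ?_ (List.Pairwise.cons hy hys)
        intro z hz
        rcases List.mem_cons.1 hz with rfl | hz
        · exact Or.inl hb
        · have hyz := hy z hz
          have hzy : before z y = false := by
            rcases hyz with h1 | ⟨_, h2, _⟩
            · exact hasym y z h1
            · exact h2
          left
          by_contra hxz
          have hxz' : before x z = false := by
            cases hxzv : before x z
            · rfl
            · exact absurd hxzv hxz
          have hc := hn x z y hxz' hzy
          rw [hc] at hb; exact Bool.noConfusion hb
      · have hbf : before x y = false := by
          cases hv : before x y
          · rfl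
          · exact absurd hv hb
        obtain ⟨hperm, hpw'⟩ := ih hys (fun z hz => hlt z (by simp [hz]))
        refine ⟨?_, ?_⟩
        · simp only [insertBy_cons, hbf, Bool.false_eq_true, if_false]
          exact (hperm.cons y).trans (List.Perm.swap x y ys)
        · simp only [insertBy_cons, hbf, Bool.false_eq_true, if_false]
          refine List.Pairwise.cons ?_ hpw'
          intro z hz
          rcases (PySem.List.mem_insertBy _ _ _ _).1 hz with rfl | hz
          · by_cases hyx : before y z
            · exact Or.inl hyx
            · exact Or.inr ⟨by cases hv : before y z; rfl; exact absurd hv hyx, hbf,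
                Nat.le_of_lt (hlt y (by simp))⟩
          · exact hy z hz

lemma stable_fold (before : Nat → Nat → Bool)
    (hasym : ∀ a b, before a b = true → before b a = false)
    (hn : ∀ a b c, before a b = false → before b c = false → before a c = false)
    (L : List Nat) (hL : L.Pairwise (· < ·)) :
    (L.foldl (fun acc x => PySem.List.insertBy before x acc) []).Perm L ∧
      (L.foldl (fun acc x => PySem.List.insertBy before x acc) []).Pairwise (pvRb before) := by
  induction L using List.reverseRecOn with
  | nil => exact ⟨List.Perm.refl _, List.Pairwise.nil⟩
  | append_singleton L x ih =>
      rw [List.pairwise_append] at hL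
      obtain ⟨hL1, _, hcross⟩ := hL
      obtain ⟨hperm, hpw⟩ := ih hL1
      rw [List.foldl_append]
      simp only [List.foldl_cons, List.foldl_nil]
      have hlt : ∀ y ∈ L.foldl (fun acc x => PySem.List.insertBy before x acc) [], y < x :=
        fun y hy => hcross y (hperm.mem_iff.1 hy) x (by simp)
      obtain ⟨hp2, hw2⟩ := insertBy_stable before hasym hn x _ hpw hlt
      exact ⟨hp2.trans ((hperm.cons x).trans (List.perm_append_singleton x L).symm), hw2⟩

-- sorting a mapped list = mapping the index-level sort
lemma sorted_map_comm {β κ : Type} [LinearOrder κ] (f : Nat → β) (key : β → κ) (I : List Nat) :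
    PySem.List.sorted (I.map f) key false
      = (I.foldl (fun acc i =>
          PySem.List.insertBy (fun a b => decide (key (f a) < key (f b))) i acc) []).map f := by
  rw [PySem.List.sorted_eq_foldl_insertBy]
  have h := foldl_insertBy_map f (fun a b => decide (key a < key b)) I []
  simpa using h

-- the key facts about A's per-line x-sort, at the index level
def pvSortX (pts : List (Int × Int)) (I : List Nat) : List Nat :=
  I.foldl (fun acc i =>
    PySem.List.insertBy (fun a b => decide (pvX pts a < pvX pts b)) i acc) []

lemma pvSortX_spec (pts : List (Int × Int)) (I : List Nat) (hI : I.Pairwise (· < ·)) :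
    (pvSortX pts I).Perm I ∧
      (pvSortX pts I).Pairwise (fun i j =>
        pvX pts i < pvX pts j ∨ (pvX pts i = pvX pts j ∧ i ≤ j)) := by
  have h := stable_fold (fun a b => decide (pvX pts a < pvX pts b))
    (by intro a b h1; simp at h1 ⊢; omega)
    (by intro a b c h1 h2; simp at h1 h2 ⊢; omega) I hI
  refine ⟨h.1, h.2.imp ?_⟩
  intro i j hij
  rcases hij with h1 | ⟨h1, h2, h3⟩
  · simp at h1; exact Or.inl h1
  · simp at h1 h2; right; constructor; omega; exact h3

-- assembling sl (the closed lines) with the x-sorted current line [a..m]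
lemma A_assemble (pts : List (Int × Int)) (t : Int) (a m : Nat) (sl : List Nat)
    (ham : a ≤ m)
    (hperm : sl.Perm (List.range a))
    (hpw : sl.Pairwise (pvR pts t))
    (hlt : ∀ j ∈ sl, pvG pts t j < pvG pts t a)
    (hconst : ∀ j, a ≤ j → j ≤ m → pvG pts t j = pvG pts t a) :
    (sl ++ pvSortX pts (List.range' a (m + 1 - a))).Perm (List.range (m + 1)) ∧
      (sl ++ pvSortX pts (List.range' a (m + 1 - a))).Pairwise (pvR pts t) ∧
      (∀ j ∈ sl ++ pvSortX pts (List.range' a (m + 1 - a)), pvG pts t j ≤ pvG pts t a) := by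
  obtain ⟨hbp, hbw⟩ := pvSortX_spec pts (List.range' a (m + 1 - a)) (List.pairwise_lt_range' 1)
  have hmem : ∀ j ∈ pvSortX pts (List.range' a (m + 1 - a)), a ≤ j ∧ j ≤ m := by
    intro j hj
    have := hbp.mem_iff.1 hj
    rw [List.mem_range'] at this
    omega
  have hG : ∀ j ∈ pvSortX pts (List.range' a (m + 1 - a)), pvG pts t j = pvG pts t a := by
    intro j hj; exact hconst j (hmem j hj).1 (hmem j hj).2
  refine ⟨?_, ?_, ?_⟩
  · have : (List.range a ++ List.range' a (m + 1 - a)) = List.range (m + 1) := by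
      rw [List.range_eq_range', List.range_eq_range']
      have := List.range'_append (s := 0) (m := a) (n := m + 1 - a) (step := 1)
      simp only [Nat.one_mul, Nat.zero_add] at this
      rw [this]
      congr 1
      omega
    rw [← this]
    exact List.Perm.append hperm hbp
  · rw [List.pairwise_append]
    refine ⟨hpw, ?_, ?_⟩
    · refine hbw.imp_of_mem ?_
      intro i j hi hj hij
      right
      refine ⟨by rw [hG i hi, hG j hj], hij⟩
    · intro i hi j hj
      left
      rw [hG j hj]
      exact hlt i hi
  · intro j hj
    rcases List.mem_append.1 hj with hj | hj
    · exact Int.le_of_lt (hlt j hj)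
    · exact le_of_eq (hG j hj)

-- getLast of a mapped contiguous range
lemma getLast_map_range' {β : Type} (f : Nat → β) (a l : Nat) (d : β) :
    ((List.range' a (l + 1)).map f).getLast?.getD d = f (a + l) := by
  rw [List.range'_concat, List.map_append]
  simp

-- the invariant of A's main loop, by induction on the number of iterations
lemma A_master (pts : List (Int × Int)) (t : Int) (m : Nat) :
    ∃ (a : Nat) (sl : List Nat),
      a ≤ m ∧
      ((List.range m).foldl
          (fun (st : List (Int × Int) × List (Int × Int)) k =>
            if |(pts.getD (k + 1) (0, 0)).2 - (st.2.getLast?.getD (0, 0)).2| ≤ t then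
              (st.1, st.2 ++ [pts.getD (k + 1) (0, 0)])
            else
              (st.1 ++ PySem.List.sorted st.2 (fun q => q.1) false, [pts.getD (k + 1) (0, 0)]))
          ([], [pts.getD 0 (0, 0)])
        = (sl.map (fun i => pts.getD i (0, 0)),
           (List.range' a (m + 1 - a)).map (fun i => pts.getD i (0, 0)))) ∧
      sl.Perm (List.range a) ∧ sl.Pairwise (pvR pts t) ∧
      (∀ j ∈ sl, pvG pts t j < pvG pts t a) ∧
      (∀ j, a ≤ j → j ≤ m → pvG pts t j = pvG pts t a) := by
  induction m with
  | zero =>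
      refine ⟨0, [], Nat.le_refl 0, ?_, List.Perm.refl _, List.Pairwise.nil, by simp, ?_⟩
      · simp
      · intro j h1 h2
        have hj0 : j = 0 := by omega
        rw [hj0]
  | succ m ih =>
      obtain ⟨a, sl, ham, heq, hperm, hpw, hlt, hconst⟩ := ih
      rw [List.range_succ, List.foldl_append]
      rw [heq]
      simp only [List.foldl_cons, List.foldl_nil]
      have hlast : (((List.range' a (m + 1 - a)).map (fun i => pts.getD i (0, 0))).getLast?.getD (0, 0))
          = pts.getD m (0, 0) := by
        have h1 : m + 1 - a = (m - a) + 1 := by omega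
        rw [h1, getLast_map_range']
        congr 1
        omega
      rw [hlast]
      by_cases hc : |(pts.getD (m + 1) (0, 0)).2 - (pts.getD m (0, 0)).2| ≤ t
      · -- same line: extend the current line
        have hGstep : pvG pts t (m + 1) = pvG pts t a := by
          have : pvG pts t (m + 1) = pvG pts t m := by
            show pvG pts t m + _ = pvG pts t m
            rw [if_neg (by unfold pvY; omega)]
            omega
          rw [this]
          exact hconst m ham (Nat.le_refl m)
        refine ⟨a, sl, Nat.le_succ_of_le ham, ?_, hperm, hpw, ?_, ?_⟩
        · rw [if_pos hc]
          have h2 : m + 1 + 1 - a = (m + 1 - a) + 1 := by omega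
          rw [h2, List.range'_concat, List.map_append]
          simp only [Nat.one_mul]
          have h3 : a + (m + 1 - a) = m + 1 := by omega
          rw [h3]
          simp
        · exact hlt
        · intro j h1 h2
          rcases Nat.lt_or_ge j (m + 1) with h3 | h3
          · exact hconst j h1 (by omega)
          · have : j = m + 1 := by omega
            rw [this, hGstep]
      · -- new line: close the current one
        have hGstep : pvG pts t (m + 1) = pvG pts t a + 1 := by
          have : pvG pts t (m + 1) = pvG pts t m + 1 := by
            show pvG pts t m + _ = pvG pts t m + 1
            rw [if_pos (by unfold pvY; omega)]
          rw [this, hconst m ham (Nat.le_refl m)]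
        obtain ⟨hap, hapw, hale⟩ := A_assemble pts t a m sl ham hperm hpw hlt hconst
        refine ⟨m + 1, sl ++ pvSortX pts (List.range' a (m + 1 - a)), Nat.le_refl _, ?_, hap, hapw, ?_, ?_⟩
        · rw [if_neg hc]
          rw [sorted_map_comm (fun i => pts.getD i (0, 0)) (fun q => q.1) (List.range' a (m + 1 - a))]
          rw [← List.map_append]
          have h2 : m + 1 + 1 - (m + 1) = 1 := by omega
          rw [h2]
          rfl
        · intro j hj
          have := hale j hj
          omega
        · intro j h1 h2
          have : j = m + 1 := by omega
          rw [this]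
  
-- B's groups list is exactly the line-index function
lemma B_groups (pts : List (Int × Int)) (t : Int) (k : Nat) :
    (List.range k).foldl
        (fun (gs : List Int) j =>
          if t < |(pts.getD (j + 1) (0, 0)).2 - (pts.getD j (0, 0)).2| then
            gs ++ [gs.getLast?.getD 0 + 1]
          else
            gs ++ [gs.getLast?.getD 0])
        [0]
      = (List.range (k + 1)).map (pvG pts t) := by
  induction k with
  | zero => simp [pvG]
  | succ k ih =>
      rw [List.range_succ, List.foldl_append, ih]
      simp only [List.foldl_cons, List.foldl_nil]
      have hlast : ((List.range (k + 1)).map (pvG pts t)).getLast?.getD 0 = pvG pts t k := by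
        rw [List.range_succ, List.map_append]
        simp
      rw [hlast]
      have hstep : pvG pts t (k + 1)
          = pvG pts t k + (if t < |(pts.getD (k + 1) (0, 0)).2 - (pts.getD k (0, 0)).2| then 1 else 0) := rfl
      by_cases hc : t < |(pts.getD (k + 1) (0, 0)).2 - (pts.getD k (0, 0)).2|
      · rw [if_pos hc, List.range_succ (n := k + 1), List.map_append]
        simp only [List.map_cons, List.map_nil]
        rw [hstep, if_pos hc]
      · rw [if_neg hc, List.range_succ (n := k + 1), List.map_append]
        simp only [List.map_cons, List.map_nil]
        rw [hstep, if_neg hc]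
        simp

lemma pvR_antisymm (pts : List (Int × Int)) (t : Int) :
    ∀ (i j : Nat), pvR pts t i j → pvR pts t j i → i = j := by
  intro i j h1 h2; unfold pvR at h1 h2; omega

-- B's comparison key, at the index level
def pvBfGX (pts : List (Int × Int)) (t : Int) (i j : Nat) : Bool :=
  decide (pvG pts t i < pvG pts t j) ||
    (!decide (pvG pts t j < pvG pts t i) && decide (pvX pts i < pvX pts j))

lemma pvBfGX_asym (pts : List (Int × Int)) (t : Int) :
    ∀ a b, pvBfGX pts t a b = true → pvBfGX pts t b a = false := by
  intro a b h; unfold pvBfGX at *; simp at *; omega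

lemma pvBfGX_ntrans (pts : List (Int × Int)) (t : Int) :
    ∀ a b c, pvBfGX pts t a b = false → pvBfGX pts t b c = false → pvBfGX pts t a c = false := by
  intro a b c h1 h2; unfold pvBfGX at *; simp at *; omega

lemma pvRb_BfGX_imp (pts : List (Int × Int)) (t : Int) :
    ∀ i j, pvRb (pvBfGX pts t) i j → pvR pts t i j := by
  intro i j h; unfold pvRb pvBfGX at h; unfold pvR; simp at h; omega

lemma getD_map_range (f : Nat → Int) (n i : Nat) (h : i < n) (d : Int) :
    ((List.range n).map f).getD i d = f i := by
  rw [List.getD_eq_getElem?_getD]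
  simp [h]

lemma cast_succ_sub_one (k : Nat) : ((k + 1 : Nat) : Int) - 1 = (k : Int) := by push_cast; ring

lemma sorted2_eq_foldl {α κ₁ κ₂ : Type} [LinearOrder κ₁] [LinearOrder κ₂]
    (xs : List α) (k1 : α → κ₁) (k2 : α → κ₂) :
    PySem.List.sorted2 xs k1 k2 false
      = xs.foldl (fun acc x => PySem.List.insertBy
          (fun a b => decide (k1 a < k1 b) || (!decide (k1 b < k1 a) && decide (k2 a < k2 b))) x acc) [] := rfl

-- the whole equivalence, for a nonempty (already Y-sorted) list pts
lemma main_ne (pts : List (Int × Int)) (t : Int) (hn1 : 1 ≤ pts.length) :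
    ((PySem.List.pyRange 1 (pts.length : Int) 1).foldl
        (fun (st : List (Int × Int) × List (Int × Int)) i =>
          if |(PySem.List.pyGetD pts i (0, 0)).2 - (st.2.getLast?.getD (0, 0)).2| ≤ t then
            (st.1, st.2 ++ [PySem.List.pyGetD pts i (0, 0)])
          else
            (st.1 ++ PySem.List.sorted st.2 (fun q => q.1) false, [PySem.List.pyGetD pts i (0, 0)]))
        ([], [PySem.List.pyGetD pts 0 (0, 0)])).1
      ++ PySem.List.sorted
          ((PySem.List.pyRange 1 (pts.length : Int) 1).foldl
            (fun (st : List (Int × Int) × List (Int × Int)) i =>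
              if |(PySem.List.pyGetD pts i (0, 0)).2 - (st.2.getLast?.getD (0, 0)).2| ≤ t then
                (st.1, st.2 ++ [PySem.List.pyGetD pts i (0, 0)])
              else
                (st.1 ++ PySem.List.sorted st.2 (fun q => q.1) false, [PySem.List.pyGetD pts i (0, 0)]))
            ([], [PySem.List.pyGetD pts 0 (0, 0)])).2 (fun q => q.1) false
    = (PySem.List.sorted2 (PySem.List.pyRange 0 (pts.length : Int) 1)
        (fun i => PySem.List.pyGetD
          ((PySem.List.pyRange 1 (pts.length : Int) 1).foldl
            (fun (gs : List Int) i =>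
              if t < |(PySem.List.pyGetD pts i (0, 0)).2 - (PySem.List.pyGetD pts (i - 1) (0, 0)).2| then
                gs ++ [gs.getLast?.getD 0 + 1]
              else
                gs ++ [gs.getLast?.getD 0])
            [0]) i 0)
        (fun i => (PySem.List.pyGetD pts i (0, 0)).1) false).map
        (fun i => PySem.List.pyGetD pts i (0, 0)) := by
  obtain ⟨n', hn'⟩ : ∃ n', pts.length = n' + 1 := ⟨pts.length - 1, by omega⟩
  have hrange : PySem.List.pyRange 1 (pts.length : Int) 1
      = (List.range n').map (fun k => ((k + 1 : Nat) : Int)) := by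
    rw [PySem.List.pyRange_one]
    have h1 : ((pts.length : Int) - 1).toNat = n' := by omega
    rw [h1]
    apply List.map_congr_left
    intro k _
    push_cast; ring
  rw [hrange]
  simp only [List.foldl_map, cast_succ_sub_one, PySem.List.pyGetD_natCast, PySem.List.pyGetD_zero]
  rw [B_groups pts t n']
  obtain ⟨a, sl, ham, heq, hperm, hpw, hlt, hconst⟩ := A_master pts t n'
  rw [heq]
  -- A side: commute the per-line sort with the indexing map
  rw [sorted_map_comm (fun i => pts.getD i (0, 0)) (fun q => q.1) (List.range' a (n' + 1 - a))]
  have hsx : (List.range' a (n' + 1 - a)).foldl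
      (fun acc i => PySem.List.insertBy
        (fun a b => decide ((pts.getD a (0, 0)).1 < (pts.getD b (0, 0)).1)) i acc) []
      = pvSortX pts (List.range' a (n' + 1 - a)) := rfl
  rw [hsx, ← List.map_append]
  -- B side: the order list is the index-level stable sort, mapped to Int
  rw [sorted2_eq_foldl, PySem.List.pyRange_zero_natCast]
  have hmap := foldl_insertBy_map (fun k : Nat => (k : Int))
    (fun a b =>
      decide (PySem.List.pyGetD ((List.range (n' + 1)).map (pvG pts t)) a 0
          < PySem.List.pyGetD ((List.range (n' + 1)).map (pvG pts t)) b 0) ||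
        (!decide (PySem.List.pyGetD ((List.range (n' + 1)).map (pvG pts t)) b 0
            < PySem.List.pyGetD ((List.range (n' + 1)).map (pvG pts t)) a 0) &&
          decide ((PySem.List.pyGetD pts a (0, 0)).1 < (PySem.List.pyGetD pts b (0, 0)).1)))
    (List.range pts.length) []
  simp only [List.map_nil] at hmap
  rw [hmap]
  have hcongr := foldl_insertBy_congr (fun i => i < pts.length)
    (fun i j =>
      decide (PySem.List.pyGetD ((List.range (n' + 1)).map (pvG pts t)) (i : Int) 0
          < PySem.List.pyGetD ((List.range (n' + 1)).map (pvG pts t)) (j : Int) 0) ||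
        (!decide (PySem.List.pyGetD ((List.range (n' + 1)).map (pvG pts t)) (j : Int) 0
            < PySem.List.pyGetD ((List.range (n' + 1)).map (pvG pts t)) (i : Int) 0) &&
          decide ((PySem.List.pyGetD pts (i : Int) (0, 0)).1 < (PySem.List.pyGetD pts (j : Int) (0, 0)).1)))
    (pvBfGX pts t)
    (by
      intro i j hi hj
      unfold pvBfGX pvX
      simp only [PySem.List.pyGetD_natCast]
      rw [getD_map_range (pvG pts t) (n' + 1) i (by omega) 0,
        getD_map_range (pvG pts t) (n' + 1) j (by omega) 0])
    (List.range pts.length) []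
    (fun a ha => List.mem_range.1 ha)
    (by intro a ha; simp at ha)
  rw [hcongr]
  -- both sides are now maps of index lists sorted by the same total order
  have hSB := stable_fold (pvBfGX pts t) (pvBfGX_asym pts t) (pvBfGX_ntrans pts t)
    (List.range pts.length) (List.pairwise_lt_range)
  have hSA := A_assemble pts t a n' sl ham hperm hpw hlt hconst
  have hkey : sl ++ pvSortX pts (List.range' a (n' + 1 - a))
      = (List.range pts.length).foldl
          (fun acc x => PySem.List.insertBy (pvBfGX pts t) x acc) [] := by
    apply List.eq_of_perm_of_sorted
      (fun i j _ _ h1 h2 => pvR_antisymm pts t i j h1 h2)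
      hSA.2.1
      (hSB.2.imp (fun h => pvRb_BfGX_imp pts t _ _ h))
    refine hSA.1.trans ?_
    have h5 : List.range (n' + 1) = List.range pts.length := by rw [hn']
    rw [h5]
    exact hSB.1.symm
  rw [← hkey, List.map_map]
  apply List.map_congr_left
  intro i _
  simp

-- ===== VERDICT (by name: the statement is the Claim_ definition above) =====
theorem sort_points_logically_spec : Claim_equal_sort_points_logically := by
  intro points t _
  unfold Spec_sort_points_logically sort_points_logically sort_points_logically_alt
  by_cases hp : points = []
  · rw [if_pos hp, if_pos hp]
  · rw [if_neg hp, if_neg hp]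
    have hn1 : 1 ≤ (PySem.List.sorted points (fun p => p.2) false).length := by
      have h1 := PySem.List.length_sorted points (fun p => p.2) false
      have h2 : 0 < points.length := List.length_pos_of_ne_nil hp
      omega
    exact main_ne (PySem.List.sorted points (fun p => p.2) false) t hn1
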